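-- pv_equiv track=rewrite | github.com/Matt-odea1/Fun-projects | Wordle/helpers.py | count_letter_types_with_feedback
-- ===== SOURCE A (Python) =====
-- def count_letter_types_with_feedback(guess, feedback):
--     letter_types = {}
--     for i, letter in enumerate(guess):
--         fb = feedback[i]
--         if letter not in letter_types:
--             letter_types[letter] = []
--         letter_types[letter].append(fb)
--     return letter_types
-- ===== SOURCE B (Python) =====
-- def count_letter_types_with_feedback(guess, feedback):
--     keys = dict.fromkeys(guess)
--     return {letter: [feedback[i] for i, l in enumerate(guess) if l == letter]
--             for letter in keys}
-- ===== Notes on version B (the rewrite author's own statement) =====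
-- stated objective: idiomatic
-- what changed: Instead of a single pass that grows each dict entry in place, B first extracts the ordered distinct letters with dict.fromkeys and then builds the result as a dict comprehension with one scan of the guess per distinct letter.
import Mathlib
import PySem

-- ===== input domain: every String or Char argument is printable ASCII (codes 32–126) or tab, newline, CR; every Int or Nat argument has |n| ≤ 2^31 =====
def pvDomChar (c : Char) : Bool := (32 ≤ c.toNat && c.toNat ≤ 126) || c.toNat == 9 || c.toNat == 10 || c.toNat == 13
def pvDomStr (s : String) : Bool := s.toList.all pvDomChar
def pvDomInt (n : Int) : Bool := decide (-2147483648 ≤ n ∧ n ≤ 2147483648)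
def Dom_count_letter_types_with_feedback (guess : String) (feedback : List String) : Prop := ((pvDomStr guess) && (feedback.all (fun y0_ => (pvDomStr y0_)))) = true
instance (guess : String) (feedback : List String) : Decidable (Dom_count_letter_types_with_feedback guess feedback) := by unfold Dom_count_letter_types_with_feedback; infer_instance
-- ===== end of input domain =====

-- B groups the feedback by distinct letter (dict.fromkeys + one scan per letter) instead of A's
-- single append-in-place dict loop; same return value, no speed claim.

-- ===== PORT A =====
def count_letter_types_with_feedback (guess : String) (feedback : List String) : List (String × List String) :=
  ((PySem.List.enumerate guess.toList).foldl
    (fun (d : PySem.Dict String (List String)) (p : Int × Char) =>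
      let fb := PySem.List.pyGetD feedback p.1 ""
      let letter := String.ofList [p.2]
      let d' := if d.contains letter then d else d.insert letter []
      d'.modify letter [] (fun l => l ++ [fb]))
    PySem.Dict.empty).items

-- ===== PORT B =====
def count_letter_types_with_feedback_alt (guess : String) (feedback : List String) : List (String × List String) :=
  let keys := PySem.List.dedup guess.toList
  keys.map (fun c =>
    (String.ofList [c],
     ((PySem.List.enumerate guess.toList).filter (fun p => p.2 == c)).map
       (fun p => PySem.List.pyGetD feedback p.1 "")))

-- ===== PRECONDITION & SPEC =====
-- Pre_ excludes exactly the inputs where Python A raises IndexError (feedback shorter than guess).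
def Pre_count_letter_types_with_feedback (guess : String) (feedback : List String) : Prop :=
  guess.toList.length ≤ feedback.length
instance (guess : String) (feedback : List String) : Decidable (Pre_count_letter_types_with_feedback guess feedback) := by unfold Pre_count_letter_types_with_feedback; infer_instance
def pvWitness_count_letter_types_with_feedback : String × List String := ("aba", ["G", "Y", "X"])

def Spec_count_letter_types_with_feedback (guess : String) (feedback : List String) (out : List (String × List String)) : Prop := out = count_letter_types_with_feedback_alt guess feedback
instance (guess : String) (feedback : List String) (out : List (String × List String)) : Decidable (Spec_count_letter_types_with_feedback guess feedback out) := by unfold Spec_count_letter_types_with_feedback; infer_instance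

-- ===== CLAIM (what is proved, stated in full; the proofs are below) =====
def Claim_equal_count_letter_types_with_feedback : Prop := ∀ (guess : String) (feedback : List String), Dom_count_letter_types_with_feedback guess feedback → Pre_count_letter_types_with_feedback guess feedback → Spec_count_letter_types_with_feedback guess feedback (count_letter_types_with_feedback guess feedback)

-- ===== LEMMAS AND PROOFS =====

theorem sing_injective : Function.Injective (fun c : Char => String.ofList [c]) := by
  intro a b h
  have := congrArg String.toList h
  simpa using this

theorem sing_beq (a b : Char) : (String.ofList [a] == String.ofList [b]) = (a == b) := by
  by_cases h : a = b
  · simp [h]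
  · have : String.ofList [a] ≠ String.ofList [b] := fun hs => h (sing_injective hs)
    simp [h, this]

-- A's "if absent, insert []; then append" step is one Dict.modify.
theorem step_modify (d : PySem.Dict String (List String)) (k : String) (fb : String) :
    (if d.contains k then d else d.insert k []).modify k [] (fun l => l ++ [fb])
      = d.modify k [] (fun l => l ++ [fb]) := by
  by_cases h : d.contains k
  · simp [h]
  · have hc : d.contains k = false := by simpa using h
    simp only [h, Bool.false_eq_true, if_false, PySem.Dict.modify,
      PySem.Dict.getD_insert_self, PySem.Dict.insert_insert_self,
      PySem.Dict.getD_of_not_contains d [] hc]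

theorem ofList_map_add {α β : Type} [BEq α] [LawfulBEq α] [BEq β] [LawfulBEq β]
    (f : α → β) (hf : Function.Injective f) (acc : List α) (x : α) :
    PySem.Set.add (acc.map f) (f x) = (PySem.Set.add acc x).map f := by
  by_cases h : x ∈ acc
  · simp [PySem.Set.add, h, List.mem_map_of_injective hf]
  · simp [PySem.Set.add, h, List.mem_map_of_injective hf]

theorem ofList_map {α β : Type} [BEq α] [LawfulBEq α] [BEq β] [LawfulBEq β]
    (f : α → β) (hf : Function.Injective f) (xs : List α) :
    PySem.Set.ofList (xs.map f) = (PySem.Set.ofList xs).map f := by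
  suffices h : ∀ acc : List α,
      List.foldl PySem.Set.add (acc.map f) (xs.map f) = (List.foldl PySem.Set.add acc xs).map f by
    simpa [PySem.Set.ofList, PySem.Set.empty] using h []
  induction xs with
  | nil => intro acc; simp
  | cons x xs ih =>
    intro acc
    simp only [List.map_cons, List.foldl_cons, ofList_map_add f hf]
    exact ih _

-- ===== VERDICT (by name: the statement is the Claim_ definition above) =====
theorem count_letter_types_with_feedback_spec : Claim_equal_count_letter_types_with_feedback := by
  intro guess feedback _ _
  unfold Spec_count_letter_types_with_feedback
  unfold count_letter_types_with_feedback count_letter_types_with_feedback_alt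
  set E := PySem.List.enumerate guess.toList with hE
  set sing := fun c : Char => String.ofList [c] with hsing
  -- rewrite A's loop body to a plain modify-loop over the pair list P
  have hbody :
      E.foldl (fun (d : PySem.Dict String (List String)) (p : Int × Char) =>
          let fb := PySem.List.pyGetD feedback p.1 ""
          let letter := String.ofList [p.2]
          let d' := if d.contains letter then d else d.insert letter []
          d'.modify letter [] (fun l => l ++ [fb]))
        PySem.Dict.empty
      = (E.map (fun p => (sing p.2, PySem.List.pyGetD feedback p.1 ""))).foldl
          (fun d p => d.modify p.1 [] (fun l => l ++ [p.2])) PySem.Dict.empty := by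
    rw [List.foldl_map]
    refine PySem.List.foldl_congr_mem E _ _ _ (fun d p _ => ?_)
    simpa using step_modify d (sing p.2) (PySem.List.pyGetD feedback p.1 "")
  rw [hbody]
  set P := E.map (fun p => (sing p.2, PySem.List.pyGetD feedback p.1 "")) with hP
  set D := P.foldl (fun d p => d.modify p.1 [] (fun l => l ++ [p.2])) PySem.Dict.empty with hD
  have hnodup : D.keys.Nodup := by
    rw [hD]
    exact PySem.Dict.nodup_keys_foldl_modify_key P Prod.fst [] (fun _ p l => l ++ [p.2])
      PySem.Dict.empty (by simp)
  have hkeys : D.keys = PySem.Set.ofList (guess.toList.map sing) := by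
    rw [hD]
    have := PySem.Dict.keys_foldl_modify_key P Prod.fst [] (fun _ p l => l ++ [p.2]) PySem.Dict.empty
    simp only at this
    rw [this]
    have hmap : P.map Prod.fst = guess.toList.map sing := by
      rw [hP, List.map_map]
      have := PySem.List.map_snd_enumerate guess.toList 0
      calc E.map (fun p => sing p.2) = (E.map Prod.snd).map sing := by
            rw [List.map_map]; rfl
        _ = guess.toList.map sing := by rw [hE, this]
    simp [PySem.Set.update, PySem.Set.ofList, PySem.Dict.keys_empty, hmap]
  have hgetD : ∀ c : Char, D.getD (sing c) []
      = ((E.filter (fun p => p.2 == c)).map (fun p => PySem.List.pyGetD feedback p.1 "")) := by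
    intro c
    rw [hD]
    rw [PySem.Dict.getD_foldl_modify_append P PySem.Dict.empty (sing c)]
    rw [hP, List.filter_map, List.map_map]
    have hpred : ((fun p : String × String => p.1 == sing c) ∘
        (fun p : Int × Char => (sing p.2, PySem.List.pyGetD feedback p.1 "")))
        = fun p : Int × Char => p.2 == c := by
      funext p; simp only [Function.comp, hsing]; exact sing_beq p.2 c
    rw [hpred]
    simp [PySem.Dict.getD_empty]
  rw [PySem.Dict.items_eq_map_keys D hnodup [], hkeys,
      ofList_map sing sing_injective, ← PySem.List.dedup_eq_ofList, List.map_map]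
  refine List.map_congr_left (fun c _ => ?_)
  simp only [Function.comp]
  rw [hgetD c]
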